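-- pv_equiv track=rewrite | github.com/PedroMoreira87/python | Raciocínio Algoritmico/8- 27-05-2020/01.py | matriz
-- ===== SOURCE A (Python) =====
-- def matriz(m):
--     ma = []
--     for i in range(len(m)):
--         linha = []
--         for j in range(len(m[i])):
--             linha.append(0)
--         ma.append(linha)
--
--     for i in range(len(m)):
--         for j in range(len(m[i])):
--             if i != j:
--                 ma[i][j] = m[i][j]
--     return ma
-- ===== SOURCE B (Python) =====
-- def matriz(m):
--     ma = []
--     for i, row in enumerate(m):
--         linha = list(row)
--         if i < len(linha):
--             linha[i] = 0
--         ma.append(linha)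
--     return ma
-- ===== Notes on version B (the rewrite author's own statement) =====
-- stated objective: simpler
-- what changed: Replaces A's two full passes (zero-initialize a whole matrix cell by cell, then re-copy every cell with an i != j test) by a single pass that bulk-copies each row and zeroes the one diagonal element when it exists.
import Mathlib
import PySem

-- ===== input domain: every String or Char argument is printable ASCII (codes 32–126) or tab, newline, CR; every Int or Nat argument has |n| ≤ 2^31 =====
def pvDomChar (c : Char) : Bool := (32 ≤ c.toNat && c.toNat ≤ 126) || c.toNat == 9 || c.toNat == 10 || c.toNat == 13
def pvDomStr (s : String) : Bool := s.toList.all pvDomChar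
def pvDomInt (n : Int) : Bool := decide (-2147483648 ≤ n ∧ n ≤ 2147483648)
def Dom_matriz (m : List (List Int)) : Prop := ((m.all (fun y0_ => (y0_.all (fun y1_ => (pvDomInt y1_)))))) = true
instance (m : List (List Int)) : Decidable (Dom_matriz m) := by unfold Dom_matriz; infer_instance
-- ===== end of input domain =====

-- B replaces A's two full passes (zero matrix built cell by cell, then every cell re-copied
-- under an i != j test) by a single pass: bulk-copy each row, zero its diagonal cell if present (simpler).


-- ===== PORT A =====
-- literal transliteration: phase 1 builds a zero matrix row by row (inner append loop),
-- phase 2 copies every off-diagonal cell by indexed assignment.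
def matriz (m : List (List Int)) : List (List Int) :=
  let ma : List (List Int) :=
    (PySem.List.pyRange 0 (m.length : Int) 1).foldl (fun ma i =>
      let linha : List Int :=
        (PySem.List.pyRange 0 ((PySem.List.pyGetD m i []).length : Int) 1).foldl
          (fun linha _ => linha ++ [(0 : Int)]) []
      ma ++ [linha]) []
  (PySem.List.pyRange 0 (m.length : Int) 1).foldl (fun ma i =>
    (PySem.List.pyRange 0 ((PySem.List.pyGetD m i []).length : Int) 1).foldl (fun ma j =>
      if i ≠ j then
        PySem.List.pySetD ma i
          (PySem.List.pySetD (PySem.List.pyGetD ma i []) j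
            (PySem.List.pyGetD (PySem.List.pyGetD m i []) j 0))
      else ma) ma) ma

-- ===== PORT B =====
-- literal transliteration of Source B: one pass over enumerate(m), bulk row copy, one diagonal write.
def matriz_alt (m : List (List Int)) : List (List Int) :=
  (PySem.List.enumerate m 0).foldl (fun ma p =>
    let linha : List Int := p.2
    let linha : List Int :=
      if p.1 < (linha.length : Int) then PySem.List.pySetD linha p.1 0 else linha
    ma ++ [linha]) []

-- ===== PRECONDITION & SPEC =====
def Spec_matriz (m : List (List Int)) (out : List (List Int)) : Prop := out = matriz_alt m
instance (m : List (List Int)) (out : List (List Int)) : Decidable (Spec_matriz m out) := by unfold Spec_matriz; infer_instance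

-- ===== CLAIM (what is proved, stated in full; the proofs are below) =====
def Claim_equal_matriz : Prop := ∀ (m : List (List Int)), Dom_matriz m → Spec_matriz m (matriz m)

-- ===== LEMMAS AND PROOFS =====

-- reference value: row k gets its k-th element zeroed (List.set is identity out of range)
def pvRef (k : Nat) : List (List Int) → List (List Int)
  | [] => []
  | r :: rs => r.set k 0 :: pvRef (k+1) rs

theorem pvRef_length (k : Nat) (m : List (List Int)) : (pvRef k m).length = m.length := by
  induction m generalizing k with
  | nil => rfl
  | cons r rs ih => simp [pvRef, ih]

theorem pvRef_getElem (k : Nat) (m : List (List Int)) (j : Nat) (hj : j < m.length) :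
    (pvRef k m)[j]'(by rw [pvRef_length]; exact hj) = m[j].set (k + j) 0 := by
  induction m generalizing k j with
  | nil => simp at hj
  | cons r rs ih =>
    cases j with
    | zero => simp [pvRef]
    | succ j =>
      simp only [pvRef, List.getElem_cons_succ]
      rw [ih (k+1) j (by simpa using hj)]
      ring_nf

-- B's fold over enumerate computes pvRef
theorem alt_eq_pvRef (m : List (List Int)) (k : Nat) (acc : List (List Int)) :
    (PySem.List.enumerate m (k : Int)).foldl (fun ma p =>
      ma ++ [if p.1 < (p.2.length : Int) then PySem.List.pySetD p.2 p.1 0 else p.2]) acc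
    = acc ++ pvRef k m := by
  induction m generalizing k acc with
  | nil => simp [PySem.List.enumerate_nil, pvRef]
  | cons r rs ih =>
    rw [PySem.List.enumerate_cons]
    simp only [List.foldl_cons]
    have hcast : (k : Int) + 1 = ((k + 1 : Nat) : Int) := by push_cast; ring
    rw [hcast, ih]
    by_cases h : k < r.length
    · rw [if_pos (by exact_mod_cast h)]
      simp [pvRef, PySem.List.pySetD_natCast]
    · rw [if_neg (show ¬((k:Int) < (r.length:Int)) by exact_mod_cast h)]
      simp only [pvRef, List.cons_append, List.append_assoc, List.nil_append]
      rw [List.set_eq_of_length_le (by omega)]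

-- the inner assignment loop touches only row i: it collapses to a set at i
theorem inner_collapse (P : Int → Prop) [DecidablePred P] (G : List Int → Int → List Int)
    (js : List Int) (ma : List (List Int)) (i : Nat) (hi : i < ma.length) :
    js.foldl (fun l j => if P j then
        PySem.List.pySetD l (i : Int) (G (PySem.List.pyGetD l (i : Int) []) j) else l) ma
    = ma.set i (js.foldl (fun r j => if P j then G r j else r) ma[i]) := by
  induction js generalizing ma with
  | nil => simp [List.set_getElem_self]
  | cons j js ih =>
    simp only [List.foldl_cons]
    by_cases h : P j
    · rw [if_pos h, if_pos h]
      rw [PySem.List.pySetD_natCast, PySem.List.pyGetD_natCast,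
        List.getD_eq_getElem _ _ hi]
      rw [ih _ (by simpa using hi)]
      simp [List.set_set]
    · rw [if_neg h, if_neg h, ih _ hi]

-- phase-1 inner loop: append len(row) zeros
theorem zero_row (n : Nat) (acc : List Int) :
    (PySem.List.pyRange 0 (n : Int) 1).foldl (fun linha _ => linha ++ [(0 : Int)]) acc
    = acc ++ List.replicate n 0 := by
  rw [PySem.List.foldl_append_singleton_eq_map]
  congr 1
  have : (fun (_ : Int) => (0 : Int)) = Function.const Int 0 := rfl
  rw [this, List.map_const]
  simp [PySem.List.length_pyRange_one]

-- phase 1 builds the all-zero matrix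
theorem phase1 (m : List (List Int)) :
    (PySem.List.pyRange 0 (m.length : Int) 1).foldl (fun ma i =>
      ma ++ [(PySem.List.pyRange 0 ((PySem.List.pyGetD m i []).length : Int) 1).foldl
        (fun linha _ => linha ++ [(0 : Int)]) []]) []
    = m.map (fun r : List Int => List.replicate r.length 0) := by
  rw [PySem.List.foldl_append_singleton_eq_map, List.nil_append]
  have h1 : ∀ i : Int, (PySem.List.pyRange 0 ((PySem.List.pyGetD m i []).length : Int) 1).foldl
      (fun linha _ => linha ++ [(0 : Int)]) []
      = List.replicate (PySem.List.pyGetD m i []).length (0 : Int) := fun i => by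
    rw [zero_row]; rfl
  rw [List.map_congr_left (fun i _ => h1 i)]
  have h2 : (PySem.List.pyRange 0 (m.length : Int) 1).map
      (fun i => List.replicate (PySem.List.pyGetD m i []).length (0 : Int))
      = ((PySem.List.pyRange 0 (m.length : Int) 1).map (fun i => PySem.List.pyGetD m i [])).map
        (fun r : List Int => List.replicate r.length (0 : Int)) := by
    rw [List.map_map]; rfl
  have h3 : ((PySem.List.pyRange 0 (m.length : Int) 1).map (fun i => PySem.List.pyGetD m i []))
      = m := PySem.List.map_pyGetD_pyRange_zero m []
  rw [h2, h3]

-- the row-level loop fills an all-zero row into row.set i 0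
theorem row_fill_aux (row : List Int) (i t : Nat) (ht : t ≤ row.length) :
    (PySem.List.pyRange 0 (t : Int) 1).foldl (fun r j => if (i : Int) ≠ j then
        PySem.List.pySetD r j (PySem.List.pyGetD row j 0) else r)
      (List.replicate row.length 0)
    = (row.set i 0).take t ++ List.replicate (row.length - t) 0 := by
  induction t with
  | zero => simp
  | succ t ih =>
    have h1 : ((t + 1 : Nat) : Int) = (t : Int) + 1 := by push_cast; ring
    rw [h1, PySem.List.pyRange_one_succ_right (by positivity), List.foldl_append,
      ih (by omega)]
    simp only [List.foldl_cons, List.foldl_nil]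
    have htlt : t < row.length := by omega
    have hplen : ((row.set i 0).take t).length = t := by
      simp [List.length_take]; omega
    have hrep : List.replicate (row.length - t) (0 : Int)
        = (0 : Int) :: List.replicate (row.length - (t+1)) 0 := by
      rw [← List.replicate_succ]; congr 1; omega
    have htk : (row.set i 0).take (t+1)
        = (row.set i 0).take t ++ [(row.set i 0)[t]'(by simpa using htlt)] :=
      List.take_succ_eq_append_getElem (by simpa using htlt)
    by_cases h : i = t
    · rw [if_neg (by simp [h])]
      rw [htk, hrep]
      simp [h]
    · rw [if_pos (by exact_mod_cast fun he => h (by exact_mod_cast he))]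
      rw [PySem.List.pySetD_natCast, PySem.List.pyGetD_natCast,
        List.getD_eq_getElem _ _ htlt]
      rw [hrep, htk]
      have hset : (((row.set i 0).take t) ++ (0 : Int) :: List.replicate (row.length - (t+1)) 0).set t row[t]
          = ((row.set i 0).take t) ++ row[t] :: List.replicate (row.length - (t+1)) 0 := by
        rw [List.set_append_right _ _ (by omega)]
        simp [hplen]
      rw [hset]
      simp [h]

theorem row_fill (row : List Int) (i : Nat) :
    (PySem.List.pyRange 0 ((row.length : Nat) : Int) 1).foldl (fun r j => if (i : Int) ≠ j then
        PySem.List.pySetD r j (PySem.List.pyGetD row j 0) else r)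
      (List.replicate row.length 0)
    = row.set i 0 := by
  rw [row_fill_aux row i row.length le_rfl]
  simp

-- phase 2: outer loop turns the zero matrix into pvRef 0 m
theorem phase2_aux (m : List (List Int)) (t : Nat) (ht : t ≤ m.length) :
    (PySem.List.pyRange 0 (t : Int) 1).foldl (fun ma i =>
      (PySem.List.pyRange 0 ((PySem.List.pyGetD m i []).length : Int) 1).foldl (fun ma j =>
        if i ≠ j then
          PySem.List.pySetD ma i
            (PySem.List.pySetD (PySem.List.pyGetD ma i []) j
              (PySem.List.pyGetD (PySem.List.pyGetD m i []) j 0))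
        else ma) ma)
      (m.map (fun r : List Int => List.replicate r.length 0))
    = (pvRef 0 m).take t ++ (m.map (fun r : List Int => List.replicate r.length 0)).drop t := by
  induction t with
  | zero => simp
  | succ t ih =>
    have h1 : ((t + 1 : Nat) : Int) = (t : Int) + 1 := by push_cast; ring
    rw [h1, PySem.List.pyRange_one_succ_right (by positivity), List.foldl_append,
      ih (by omega)]
    simp only [List.foldl_cons, List.foldl_nil]
    have htlt : t < m.length := by omega
    have hacc : ((pvRef 0 m).take t ++ (m.map (fun r : List Int => List.replicate r.length 0)).drop t).length
        = m.length := by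
      simp [List.length_take, pvRef_length]; omega
    have hplen : ((pvRef 0 m).take t).length = t := by
      simp [List.length_take, pvRef_length]; omega
    have hget : PySem.List.pyGetD m (t : Int) [] = m[t] := by
      rw [PySem.List.pyGetD_natCast, List.getD_eq_getElem _ _ htlt]
    rw [hget]
    rw [inner_collapse (fun j => (t : Int) ≠ j)
      (fun r j => PySem.List.pySetD r j (PySem.List.pyGetD m[t] j 0)) _ _ t (by omega)]
    have haccget : ((pvRef 0 m).take t ++ (m.map (fun r : List Int => List.replicate r.length 0)).drop t)[t]'(by omega)
        = List.replicate m[t].length (0 : Int) := by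
      rw [List.getElem_append_right (by omega)]
      simp [hplen]
    rw [haccget, row_fill m[t] t]
    have hdrop : (m.map (fun r : List Int => List.replicate r.length 0)).drop t
        = List.replicate m[t].length (0 : Int) :: (m.map (fun r : List Int => List.replicate r.length 0)).drop (t+1) := by
      rw [List.drop_eq_getElem_cons (by simpa using htlt)]
      simp
    have htk : (pvRef 0 m).take (t+1)
        = (pvRef 0 m).take t ++ [m[t].set t 0] := by
      rw [List.take_succ_eq_append_getElem (by rw [pvRef_length]; exact htlt)]
      rw [pvRef_getElem 0 m t htlt]
      simp
    rw [hdrop, htk]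
    rw [List.set_append_right _ _ (by omega)]
    simp [hplen]

-- ===== VERDICT (by name: the statement is the Claim_ definition above) =====
theorem matriz_spec : Claim_equal_matriz := by
  intro m _
  unfold Spec_matriz
  have hb := alt_eq_pvRef m 0 []
  simp only [Nat.cast_zero, List.nil_append] at hb
  have ha2 := phase2_aux m m.length le_rfl
  rw [List.take_of_length_le (le_of_eq (pvRef_length 0 m)),
    List.drop_of_length_le (by simp), List.append_nil] at ha2
  simp only [matriz, matriz_alt]
  rw [phase1, ha2, ← hb]
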